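-- pv_equiv track=rewrite | github.com/maximilianknuerr/efficient_algorithms | efficient2.py | get_triplets
-- ===== SOURCE A (Python) =====
-- def get_triplets(input_string):
--     triplets_1 = []
--     triplets_2 = []
--
--     for i in range(0, len(input_string) + 1):
--         substring = input_string[i: i + 3]
--         while(len(substring) < 3):
--             substring += '$'
--         #triplet = {
--         #    "triplet": substring,
--         #    "position": i + 1
--         #}
--         triplet = substring
--         mod_3 = i % 3
--
--         if(mod_3 == 1):
--             triplets_1.append(triplet)
--         elif(mod_3 == 2):
--             triplets_2.append(triplet)
--
--
--     return triplets_1 + triplets_2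
-- ===== SOURCE B (Python) =====
-- def _pad3(s, i):
--     return (s[i:i + 3] + '$$$')[:3]
--
--
-- def get_triplets(input_string):
--     n = len(input_string)
--     return [_pad3(input_string, i) for i in range(1, n + 1, 3)] + \
--            [_pad3(input_string, i) for i in range(2, n + 1, 3)]
-- ===== Notes on version B (the rewrite author's own statement) =====
-- stated objective: alternative
-- what changed: Replaces the single loop over all indices with its modulo-3 branching and character-by-character while-loop padding by two stepped range comprehensions (step 3, starting at offsets 1 and 2) that build each result list directly, padding each slice to width 3 in a single slice-concatenate-truncate expression.
import Mathlib
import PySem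

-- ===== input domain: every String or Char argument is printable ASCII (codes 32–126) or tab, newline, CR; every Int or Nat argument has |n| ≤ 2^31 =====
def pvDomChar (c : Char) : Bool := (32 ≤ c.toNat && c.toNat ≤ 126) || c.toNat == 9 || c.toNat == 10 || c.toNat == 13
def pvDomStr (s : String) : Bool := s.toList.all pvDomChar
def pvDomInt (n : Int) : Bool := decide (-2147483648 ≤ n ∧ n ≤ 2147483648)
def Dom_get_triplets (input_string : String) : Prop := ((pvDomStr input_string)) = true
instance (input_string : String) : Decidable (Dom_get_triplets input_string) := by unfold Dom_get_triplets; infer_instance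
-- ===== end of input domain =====

-- B replaces A's single all-index loop with mod-3 branching and a while-loop that pads character by character
-- by two stepped (step-3) range passes padding each slice in one expression (alternative decomposition, same cost).

-- ===== PORT A =====
-- the 'while len(substring) < 3: substring += "$"' loop of A
def padWhile (substring : List Char) : List Char :=
  if substring.length < 3 then padWhile (substring ++ ['$']) else substring
  termination_by 3 - substring.length
  decreasing_by simp [List.length_append]; omega

def get_triplets (input_string : String) : List String :=
  let cs := input_string.toList
  let r := (PySem.List.pyRange 0 (PySem.Str.len input_string + 1) 1).foldl
    (fun acc i =>
      let substring := padWhile (PySem.List.slice cs (some i) (some (i + 3)))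
      let triplet := String.mk substring
      let mod_3 := PySem.Int.mod i 3
      if mod_3 = 1 then (acc.1 ++ [triplet], acc.2)
      else if mod_3 = 2 then (acc.1, acc.2 ++ [triplet])
      else acc)
    (([], []) : List String × List String)
  r.1 ++ r.2

-- ===== PORT B =====
-- B's helper _pad3: (s[i:i+3] + '$$$')[:3]
def pad3 (cs : List Char) (i : Int) : String :=
  String.mk (PySem.List.slice (PySem.List.slice cs (some i) (some (i + 3)) ++ ['$', '$', '$']) none (some 3))

def get_triplets_alt (input_string : String) : List String :=
  let cs := input_string.toList
  let n := PySem.Str.len input_string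
  (PySem.List.pyRange 1 (n + 1) 3).map (pad3 cs) ++ (PySem.List.pyRange 2 (n + 1) 3).map (pad3 cs)

-- ===== PRECONDITION & SPEC =====
def Spec_get_triplets (input_string : String) (out : List String) : Prop := out = get_triplets_alt input_string
instance (input_string : String) (out : List String) : Decidable (Spec_get_triplets input_string out) := by unfold Spec_get_triplets; infer_instance

-- ===== CLAIM (what is proved, stated in full; the proofs are below) =====
def Claim_equal_get_triplets : Prop := ∀ (input_string : String), Dom_get_triplets input_string → Spec_get_triplets input_string (get_triplets input_string)

-- ===== LEMMAS AND PROOFS =====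

-- A's padded triplet at index i
def tripA (cs : List Char) (i : Int) : String :=
  String.mk (padWhile (PySem.List.slice cs (some i) (some (i + 3))))

lemma padWhile_eq_take (l : List Char) (h : l.length ≤ 3) :
    padWhile l = (l ++ ['$', '$', '$']).take 3 := by
  rcases l with _ | ⟨a, _ | ⟨b, _ | ⟨c, _ | ⟨d, t⟩⟩⟩⟩
  · simp [padWhile]
  · simp [padWhile]
  · simp [padWhile]
  · simp [padWhile]
  · simp at h; omega

lemma tripA_eq_pad3 (cs : List Char) (k : ℕ) : tripA cs (k : Int) = pad3 cs (k : Int) := by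
  have h3 : ((k : Int) + 3) = ((k : Int) + ((3 : ℕ) : Int)) := by norm_cast
  unfold tripA pad3
  rw [h3, PySem.List.slice_natCast_add]
  rw [padWhile_eq_take _ (by simp [List.length_take])]
  rw [show ((3 : Int)) = ((3 : ℕ) : Int) from rfl, PySem.List.slice_to_natCast]

-- A's fold splits into two filtered map-passes
lemma foldA_eq (cs : List Char) (l : List Int) (a b : List String) :
    (l.foldl
      (fun acc i =>
        let substring := padWhile (PySem.List.slice cs (some i) (some (i + 3)))
        let triplet := String.mk substring
        let mod_3 := PySem.Int.mod i 3
        if mod_3 = 1 then (acc.1 ++ [triplet], acc.2)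
        else if mod_3 = 2 then (acc.1, acc.2 ++ [triplet])
        else acc)
      (a, b)) =
    (a ++ (l.filter (fun i => decide (PySem.Int.mod i 3 = 1))).map (tripA cs),
     b ++ (l.filter (fun i => decide (PySem.Int.mod i 3 = 2))).map (tripA cs)) := by
  induction l generalizing a b with
  | nil => simp
  | cons x xs ih =>
    simp only [List.foldl_cons, List.filter_cons]
    have hme : PySem.Int.mod x 3 = x % 3 :=
      PySem.Int.mod_eq_emod_of_pos (by norm_num)
    by_cases h1 : PySem.Int.mod x 3 = 1
    · rw [hme] at h1
      simp only [hme, h1, decide_true, if_true, ih, List.map_cons]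
      simp [tripA]
    · by_cases h2 : PySem.Int.mod x 3 = 2
      · rw [hme] at h1 h2
        simp only [hme, h2, ih]
        simp [tripA]
      · rw [hme] at h1 h2
        simp only [hme, ih]
        simp [h1, h2]

-- filtering the mod-r residues out of range m is the stepped range
lemma filter_range_mod1 (m : ℕ) :
    (List.range m).filter (fun k => decide (k % 3 = 1)) =
      (List.range ((m + 1) / 3)).map (fun j => 1 + 3 * j) := by
  induction m with
  | zero => rfl
  | succ m ih =>
    rw [List.range_succ, List.filter_append, ih]
    by_cases h : m % 3 = 1
    · have hc : (m + 1 + 1) / 3 = (m + 1) / 3 + 1 := by omega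
      rw [hc, List.range_succ, List.map_append]
      simp only [List.filter_cons, List.filter_nil, h, decide_true, if_true]
      simp
      omega
    · have hc : (m + 1 + 1) / 3 = (m + 1) / 3 := by omega
      simp [hc, h]

lemma filter_range_mod2 (m : ℕ) :
    (List.range m).filter (fun k => decide (k % 3 = 2)) =
      (List.range (m / 3)).map (fun j => 2 + 3 * j) := by
  induction m with
  | zero => rfl
  | succ m ih =>
    rw [List.range_succ, List.filter_append, ih]
    by_cases h : m % 3 = 2
    · have hc : (m + 1) / 3 = m / 3 + 1 := by omega
      rw [hc, List.range_succ, List.map_append]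
      simp only [List.filter_cons, List.filter_nil, h, decide_true, if_true]
      simp
      omega
    · have hc : (m + 1) / 3 = m / 3 := by omega
      simp [hc, h]

-- ===== VERDICT (by name: the statement is the Claim_ definition above) =====
theorem get_triplets_spec : Claim_equal_get_triplets := by
  intro s _
  unfold Spec_get_triplets get_triplets get_triplets_alt
  simp only []
  set cs := s.toList with hcs
  have hlen : PySem.Str.len s = (cs.length : Int) := by
    simp [PySem.Str.len_eq, hcs]
  set n := cs.length with hn
  have hb : PySem.Str.len s + 1 = ((n + 1 : ℕ) : Int) := by push_cast [hlen]; ring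
  rw [hb, PySem.List.pyRange_zero_natCast, foldA_eq]
  -- A side: filters over casted range
  rw [List.filter_map, List.filter_map]
  have hp1 : ((fun i => decide (PySem.Int.mod i 3 = 1)) ∘ fun (k : ℕ) => (k : Int)) =
      fun k => decide (k % 3 = 1) := by
    funext k
    simp only [Function.comp]
    rw [PySem.Int.mod_eq_emod_of_pos (by norm_num)]
    simp only [decide_eq_decide]
    omega
  have hp2 : ((fun i => decide (PySem.Int.mod i 3 = 2)) ∘ fun (k : ℕ) => (k : Int)) =
      fun k => decide (k % 3 = 2) := by
    funext k
    simp only [Function.comp]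
    rw [PySem.Int.mod_eq_emod_of_pos (by norm_num)]
    simp only [decide_eq_decide]
    omega
  rw [hp1, hp2, filter_range_mod1, filter_range_mod2]
  -- B side: stepped ranges as mapped ranges
  rw [PySem.List.pyRange_of_pos _ _ (by norm_num : (0:Int) < 3),
      PySem.List.pyRange_of_pos _ _ (by norm_num : (0:Int) < 3)]
  dsimp only
  have hc1 : (if (1 : Int) < ((n + 1 : ℕ) : Int) then ((((n + 1 : ℕ) : Int) - 1 + 3 - 1) / 3).toNat else 0)
      = (n + 1 + 1) / 3 := by split_ifs with h <;> omega
  have hc2 : (if (2 : Int) < ((n + 1 : ℕ) : Int) then ((((n + 1 : ℕ) : Int) - 2 + 3 - 1) / 3).toNat else 0)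
      = (n + 1) / 3 := by split_ifs with h <;> omega
  rw [hc1, hc2]
  simp only [List.nil_append, List.map_map]
  congr 1
  · apply List.map_congr_left
    intro j _
    simp only [Function.comp_apply]
    have : ((1 : Int) + 3 * (j : Int)) = (((1 + 3 * j : ℕ) : Int)) := by push_cast; ring
    rw [this, tripA_eq_pad3]
  · apply List.map_congr_left
    intro j _
    simp only [Function.comp_apply]
    have : ((2 : Int) + 3 * (j : Int)) = (((2 + 3 * j : ℕ) : Int)) := by push_cast; ring
    rw [this, tripA_eq_pad3]
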